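-- pv_equiv track=rewrite | github.com/AlexandrMolyavin/CodeWars | 5_kyu/All Star Code Challenge #19.py | slogan_maker
-- ===== SOURCE A (Python) =====
-- from itertools import permutations
--
-- def slogan_maker(array):
--     #your code here
--     arr=[]
--     for item in array:
--         if not item in arr:
--             arr.append(item)
--     if len(arr)==1:
--         return arr
--     arr=list(permutations(arr))
--     res=[]
--     for j in range(len(arr)):
--         tmp=''
--         for i in range(len(arr[0])):
--             tmp=tmp+' '+arr[j][i]
--         res.append(tmp[1:])
--     return res
-- ===== SOURCE B (Python) =====
-- def slogan_maker(array):
--     words = []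
--     for w in array:
--         if w not in words:
--             words.append(w)
--     out = []
--
--     def build(remaining, acc):
--         if not remaining:
--             out.append(' '.join(acc))
--             return
--         for i in range(len(remaining)):
--             build(remaining[:i] + remaining[i + 1:], acc + [remaining[i]])
--
--     build(words, [])
--     return out
-- ===== Notes on version B (the rewrite author's own statement) =====
-- stated objective: alternative
-- what changed: Replaces itertools.permutations plus two index loops that re-join each tuple with a recursive backtracking helper that picks the next word in index order and emits each fully built ' '-joined slogan directly, never materialising the permutation tuples.
import Mathlib
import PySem

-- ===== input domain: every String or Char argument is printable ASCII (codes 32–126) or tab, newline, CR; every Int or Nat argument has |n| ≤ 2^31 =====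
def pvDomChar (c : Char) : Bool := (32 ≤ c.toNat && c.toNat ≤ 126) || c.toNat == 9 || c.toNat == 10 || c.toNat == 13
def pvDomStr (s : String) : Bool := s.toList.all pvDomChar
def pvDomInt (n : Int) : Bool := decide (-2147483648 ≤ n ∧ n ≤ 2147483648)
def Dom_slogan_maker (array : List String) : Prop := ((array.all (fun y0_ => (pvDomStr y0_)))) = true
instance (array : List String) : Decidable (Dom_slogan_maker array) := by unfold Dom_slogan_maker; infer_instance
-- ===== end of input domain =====

-- B replaces itertools.permutations + join loops by a recursive backtracking helper that
-- emits each ' '-joined slogan directly (alternative decomposition, same asymptotic cost).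

-- ===== PORT A =====
-- arr = dedup loop; then list(permutations(arr)); then the two index loops building res.
def slogan_maker (array : List String) : List String :=
  let arr := array.foldl (fun acc item => if item ∈ acc then acc else acc ++ [item]) []
  if arr.length = 1 then arr
  else
    let arr2 := PySem.List.permutations arr arr.length
    (List.range arr2.length).foldl
      (fun res j =>
        let tmp := (List.range ((arr2.getD 0 []).length)).foldl
          (fun tmp i => tmp ++ " " ++ ((arr2.getD j []).getD i "")) ""
        res ++ [PySem.Str.slice tmp (some 1) none]) []

-- ===== PORT B =====
-- the recursive helper `build(remaining, acc)`: `remaining[:i] + remaining[i+1:]` is eraseIdx i,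
-- `remaining[i]` with i < len(remaining) is getD i "" (exact in range); `out` is threaded.
def pvBuild (remaining acc out : List String) : List String :=
  if remaining = [] then out ++ [PySem.Str.join " " acc]
  else
    (List.range remaining.length).attach.foldl
      (fun o i => pvBuild (remaining.eraseIdx i.1) (acc ++ [remaining.getD i.1 ""]) o) out
termination_by remaining.length
decreasing_by
  have hi : i.1 < remaining.length := List.mem_range.mp i.2
  rw [List.length_eraseIdx_of_lt hi]
  omega

def slogan_maker_alt (array : List String) : List String :=
  let words := array.foldl (fun acc w => if w ∈ acc then acc else acc ++ [w]) []
  pvBuild words [] []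

-- ===== PRECONDITION & SPEC =====
def Spec_slogan_maker (array : List String) (out : List String) : Prop := out = slogan_maker_alt array
instance (array : List String) (out : List String) : Decidable (Spec_slogan_maker array out) := by unfold Spec_slogan_maker; infer_instance

-- ===== CLAIM (what is proved, stated in full; the proofs are below) =====
def Claim_equal_slogan_maker : Prop := ∀ (array : List String), Dom_slogan_maker array → Spec_slogan_maker array (slogan_maker array)

-- ===== LEMMAS AND PROOFS =====

-- A's join of one permutation: build tmp with leading spaces, then drop the first char.
def pvJoinA (p : List String) : String :=
  PySem.Str.slice (p.foldl (fun t x => t ++ " " ++ x) "") (some 1) none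

-- characters of A's tmp loop
lemma pvFoldl_toList (p : List String) (s : String) :
    (p.foldl (fun t x => t ++ " " ++ x) s).toList
      = s.toList ++ (p.map (fun x => ' ' :: x.toList)).flatten := by
  induction p generalizing s with
  | nil => simp
  | cons x r ih => simp [List.foldl_cons, ih, String.toList_append]

-- ' '.join as tail of the space-prefixed flatten
lemma pvJoin_eq_tail_flatten (l : List (List Char)) :
    PySem.Chars.join [' '] l = ((l.map (fun d => ' ' :: d)).flatten).tail := by
  induction l with
  | nil => simp [PySem.Chars.join_nil]
  | cons d rest ih =>
    cases rest with
    | nil => simp [PySem.Chars.join_singleton]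
    | cons e rest' =>
      rw [PySem.Chars.join_cons_cons, ih]
      simp

lemma pvJoinA_eq_join (p : List String) : pvJoinA p = PySem.Str.join " " p := by
  apply String.toList_inj.mp
  rw [pvJoinA, PySem.Str.toList_slice, PySem.Chars.slice_eq_listSlice,
    PySem.List.slice_from_one, pvFoldl_toList, PySem.Str.toList_join,
    show (" " : String).toList = [' '] from rfl, pvJoin_eq_tail_flatten]
  simp [List.map_map, Function.comp_def]

-- inner index loop over range(len p) = fold over p itself
lemma pvRangeFold (p : List String) (s : String) :
    (List.range p.length).foldl (fun t i => t ++ " " ++ (p.getD i "")) s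
      = p.foldl (fun t x => t ++ " " ++ x) s := by
  induction p generalizing s with
  | nil => simp
  | cons x r ih =>
    rw [List.length_cons, List.range_succ_eq_map, List.foldl_cons, List.foldl_map]
    simpa using ih (s ++ " " ++ x)

-- map over range(len xs) with getD = map over xs
lemma pvMapRangeGetD {A B : Type} (xs : List A) (d : A) (g : A -> B) :
    (List.range xs.length).map (fun j => g (xs.getD j d)) = xs.map g := by
  induction xs using List.reverseRecOn with
  | nil => simp
  | append_singleton ys y ih =>
    rw [List.length_append, List.length_cons, List.length_nil, Nat.add_zero,
      List.range_succ, List.map_append, List.map_append]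
    congr 1
    · rw [← ih]
      exact List.map_congr_left fun j hj => by
        rw [List.getD_append _ _ _ j (List.mem_range.mp hj)]
    · simp only [List.map_cons, List.map_nil]
      rw [List.getD_append_right ys [y] d ys.length le_rfl]
      simp

-- every member of permutations l l.length has length l.length
lemma pvPermLength {l p : List String} (h : p ∈ PySem.List.permutations l l.length) :
    p.length = l.length :=
  (PySem.List.perm_of_mem_permutations h).length_eq

-- permutations l l.length is never empty
lemma pvPermsNeNilAux : ∀ (n : Nat) (l : List String), l.length = n →
    PySem.List.permutations l n ≠ [] := by
  intro n
  induction n with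
  | zero => intro l _; rw [PySem.List.permutations_zero]; simp
  | succ k ih =>
    intro l hl hnil
    rw [PySem.List.permutations_succ] at hnil
    have h0 : (0 : Nat) ∈ List.range l.length := List.mem_range.mpr (by omega)
    have := (List.flatMap_eq_nil_iff.mp hnil) 0 h0
    have hget : l[0]? = some (l.getD 0 "") := by
      rw [List.getD_eq_getElem l "" (by omega)]
      exact List.getElem?_eq_getElem (by omega)
    rw [hget] at this
    simp only [List.map_eq_nil_iff] at this
    exact ih (l.eraseIdx 0) (by rw [List.length_eraseIdx_of_lt (by omega)]; omega) this

lemma pvPermsNeNil (l : List String) : PySem.List.permutations l l.length ≠ [] :=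
  pvPermsNeNilAux l.length l rfl

-- core: pvBuild enumerates the permutations in itertools order, joined with ' '
lemma pvBuild_eq : ∀ (n : Nat) (rem : List String), rem.length = n → ∀ acc out,
    pvBuild rem acc out
      = out ++ (PySem.List.permutations rem rem.length).map
          (fun p => PySem.Str.join " " (acc ++ p)) := by
  intro n
  induction n using Nat.strong_induction_on with
  | _ n ih =>
    intro rem hlen acc out
    rw [pvBuild]
    by_cases h : rem = []
    · subst h
      simp [PySem.List.permutations_zero]
    · rw [if_neg h]
      have hpos : 0 < rem.length := List.length_pos_of_ne_nil h
      -- rewrite each recursive call via the induction hypothesis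
      rw [PySem.List.foldl_congr_mem _ _
        (fun o i => o ++ (PySem.List.permutations (rem.eraseIdx i.1)
            (rem.eraseIdx i.1).length).map
            (fun p => PySem.Str.join " " ((acc ++ [rem.getD i.1 ""]) ++ p))) out
        (fun o i _ => by
          exact ih (rem.eraseIdx i.1).length
            (by rw [List.length_eraseIdx_of_lt (List.mem_range.mp i.2)]; omega)
            (rem.eraseIdx i.1) rfl (acc ++ [rem.getD i.1 ""]) o),
        PySem.List.foldl_append_eq_flatMap]
      congr 1
      simp only [List.flatMap_subtype, List.unattach_attach]
      -- right-hand side: one unfolding of permutations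
      conv_rhs => rw [show rem.length = (rem.length - 1) + 1 from by omega,
        PySem.List.permutations_succ]
      rw [List.map_flatMap]
      refine List.flatMap_congr fun i hi => ?_
      have hilt : i < rem.length := List.mem_range.mp hi
      have hget : rem[i]? = some (rem.getD i "") := by
        rw [List.getD_eq_getElem rem "" hilt]
        exact List.getElem?_eq_getElem hilt
      rw [hget]
      have hek : (rem.eraseIdx i).length = rem.length - 1 :=
        List.length_eraseIdx_of_lt hilt
      rw [hek]
      simp [List.map_map, Function.comp]

-- the two bodies agree on any deduped list
lemma pvMain (l : List String) :
    (if l.length = 1 then l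
     else
       let arr2 := PySem.List.permutations l l.length
       (List.range arr2.length).foldl
         (fun res j =>
           let tmp := (List.range ((arr2.getD 0 []).length)).foldl
             (fun tmp i => tmp ++ " " ++ ((arr2.getD j []).getD i "")) ""
           res ++ [PySem.Str.slice tmp (some 1) none]) [])
    = pvBuild l [] [] := by
  rw [pvBuild_eq l.length l rfl [] []]
  simp only [List.nil_append]
  by_cases h1 : l.length = 1
  · rw [if_pos h1]
    obtain ⟨x, rfl⟩ := List.length_eq_one_iff.mp h1
    have : PySem.List.permutations [x] 1 = [[x]] := rfl
    rw [show ([x] : List String).length = 1 from rfl, this]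
    simp only [List.map_cons, List.map_nil]
    congr 1
    apply String.toList_inj.mp
    rw [PySem.Str.toList_join, show (" " : String).toList = [' '] from rfl]
    simp [PySem.Chars.join_singleton]
  · rw [if_neg h1]
    obtain ⟨q, t, hp⟩ := List.exists_cons_of_ne_nil (pvPermsNeNil l)
    have hq : q.length = l.length := pvPermLength (by rw [hp]; exact List.mem_cons_self)
    rw [hp]
    rw [PySem.List.foldl_append_singleton_eq_map
      (fun j => PySem.Str.slice ((List.range (((q :: t).getD 0 []).length)).foldl
        (fun tmp i => tmp ++ " " ++ (((q :: t).getD j []).getD i "")) "") (some 1) none),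
      List.nil_append, List.getD_cons_zero, hq,
      pvMapRangeGetD (q :: t) [] (fun p => PySem.Str.slice ((List.range l.length).foldl
        (fun tmp i => tmp ++ " " ++ (p.getD i "")) "") (some 1) none)]
    refine List.map_congr_left fun p hpmem => ?_
    have hplen : p.length = l.length := pvPermLength (by rw [hp]; exact hpmem)
    rw [← hplen, pvRangeFold p "", show (PySem.Str.slice (List.foldl
      (fun t x => t ++ " " ++ x) "" p) (some 1) none) = pvJoinA p from rfl,
      pvJoinA_eq_join]

-- ===== VERDICT (by name: the statement is the Claim_ definition above) =====
theorem slogan_maker_spec : Claim_equal_slogan_maker := by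
  intro array _
  unfold Spec_slogan_maker slogan_maker slogan_maker_alt
  exact pvMain _
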